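-- pv_equiv track=rewrite | github.com/DOSull/weaving-space | weavingspace/_oo_topology.py | _get_edge_labels_from_vertex_labels
-- ===== SOURCE A (Python) =====
-- import string
--
-- LETTERS = string.ascii_letters.upper()
--
-- letters = string.ascii_letters.lower()
--
-- def _get_edge_labels_from_vertex_labels(
--                                         vlabels:list[str]) -> list[str]:
--   edge_labels = [a + b for a, b in zip(vlabels, vlabels[1:] + vlabels[:1])]
--   letter = LETTERS.index(min(list(vlabels)))
--   elabels = {}
--   for e in edge_labels:
--     if not e in elabels:
--       if e[::-1] in elabels:
--         elabels[e] = elabels[e[::-1]]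
--       else:
--         elabels[e] = letters[letter]
--         letter = letter + 1
--     # if not e in elabels:
--     #   if e[::-1] in elabels:
--     #     label = elabels[e[::-1]]
--     #     elabels[e] = label + "-"
--     #     elabels[e[::-1]] = label + "+"
--     #   else:
--     #     elabels[e] = letters[letter]
--     #     letter = letter + 1
--   return [elabels[l] for l in edge_labels]
-- ===== SOURCE B (Python) =====
-- import string
--
-- LETTERS = string.ascii_letters.upper()
--
-- letters = string.ascii_letters.lower()
--
-- def _get_edge_labels_from_vertex_labels(vlabels):
--   edges = [a + b for a, b in zip(vlabels, vlabels[1:] + vlabels[:1])]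
--   letter = LETTERS.index(min(vlabels))
--   canon = [e[::-1] if e[::-1] < e else e for e in edges]
--   order = list(dict.fromkeys(canon))
--   return [letters[letter + order.index(k)] for k in canon]
-- ===== Notes on version B (the rewrite author's own statement) =====
-- stated objective: simpler
-- what changed: B drops A's mutable dict with its explicit reverse-membership branch: it canonicalises each edge key once (pick the lexicographically smaller of e and e[::-1]), dedups that list, and reads every letter directly off the canonical key's first-occurrence index.
import Mathlib
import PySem

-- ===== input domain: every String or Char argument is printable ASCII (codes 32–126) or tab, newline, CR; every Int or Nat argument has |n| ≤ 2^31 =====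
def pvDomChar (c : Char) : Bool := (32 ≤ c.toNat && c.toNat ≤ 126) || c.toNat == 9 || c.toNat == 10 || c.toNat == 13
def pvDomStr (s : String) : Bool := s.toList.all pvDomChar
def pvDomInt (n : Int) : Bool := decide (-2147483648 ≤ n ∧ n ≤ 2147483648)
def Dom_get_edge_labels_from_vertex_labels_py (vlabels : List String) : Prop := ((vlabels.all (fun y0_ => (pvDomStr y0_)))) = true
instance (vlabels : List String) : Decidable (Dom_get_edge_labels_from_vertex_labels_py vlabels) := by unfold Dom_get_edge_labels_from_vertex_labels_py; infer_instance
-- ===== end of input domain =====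

-- B replaces A's dict loop with its explicit reverse-membership branch by a canonical-key normal form:
-- dedup the canonicalised edge list once and read each letter off the key's first-occurrence index (objective: simpler).

-- ===== PORT A =====
-- string.ascii_letters.upper() / .lower() (52 characters each)
def LETTERS_py : String := "ABCDEFGHIJKLMNOPQRSTUVWXYZABCDEFGHIJKLMNOPQRSTUVWXYZ"
def letters_py : String := "abcdefghijklmnopqrstuvwxyzabcdefghijklmnopqrstuvwxyz"

-- e[::-1] (step -1 slice is never an error, so getD is safe)
def srev (s : String) : String := (PySem.Str.slice? s none none (-1)).getD ""

-- edge_labels = [a + b for a, b in zip(vlabels, vlabels[1:] + vlabels[:1])]  (shared line of both Pythons)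
def edgesOf (vlabels : List String) : List String :=
  (List.zip vlabels ((PySem.List.slice vlabels (some 1) none) ++ (PySem.List.slice vlabels none (some 1)))).map
    (fun p => p.1 ++ p.2)

-- the body of A's for-loop; none = the IndexError from letters[letter]
def stepA (st : Option (PySem.Dict String String × Int)) (e : String) :
    Option (PySem.Dict String String × Int) :=
  match st with
  | none => none
  | some (d, letter) =>
    if d.contains e then some (d, letter)
    else if d.contains (srev e) then
      match d.get? (srev e) with
      | some v => some (d.insert e v, letter)
      | none => none  -- unreachable: key was just checked
    else
      match PySem.Str.pyGet? letters_py letter with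
      | some ch => some (d.insert e (String.singleton ch), letter + 1)
      | none => none  -- IndexError: letter out of range; excluded by Pre_

def get_edge_labels_from_vertex_labels_py (vlabels : List String) : List String :=
  let edge_labels := edgesOf vlabels
  -- Python's min / '<' on str is code-point order: compare via .toList (PYSEM str comparison)
  match PySem.List.min? vlabels (fun x => x.toList) with
  | none => []  -- min([]) raises ValueError; excluded by Pre_
  | some m =>
    let letter : Int := PySem.Str.find LETTERS_py m
    if letter < 0 then []  -- LETTERS.index raises ValueError; excluded by Pre_
    else
      match edge_labels.foldl stepA (some (PySem.Dict.empty, letter)) with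
      | none => []  -- IndexError inside the loop; excluded by Pre_
      | some (d, _) => edge_labels.map (fun l => (d.get? l).getD "")  -- every l is a key of d

-- ===== PORT B =====
-- e[::-1] if e[::-1] < e else e
def canonB (e : String) : String := if (srev e).toList < e.toList then srev e else e

def get_edge_labels_from_vertex_labels_py_alt (vlabels : List String) : List String :=
  let edges := edgesOf vlabels
  -- Python's min / '<' on str is code-point order: compare via .toList (PYSEM str comparison)
  match PySem.List.min? vlabels (fun x => x.toList) with
  | none => []  -- min([]) raises ValueError; excluded by Pre_
  | some m =>
    let letter : Int := PySem.Str.find LETTERS_py m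
    if letter < 0 then []  -- LETTERS.index raises ValueError; excluded by Pre_
    else
      let canon := edges.map canonB
      let order := PySem.List.dedup canon
      canon.map (fun k =>
        match PySem.List.index? order k with
        | some i =>
          match PySem.Str.pyGet? letters_py (letter + (i : Int)) with
          | some ch => String.singleton ch
          | none => ""  -- IndexError; excluded by Pre_
        | none => "")  -- unreachable: k ∈ order

-- ===== PRECONDITION & SPEC =====
-- Pre_ = exactly the inputs where the Python returns: vlabels nonempty, its minimum occurs in
-- LETTERS (else ValueError), and the letter start index plus the number of distinct undirected
-- edges stays within the 52 available letters (else IndexError).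
def Pre_get_edge_labels_from_vertex_labels_py (vlabels : List String) : Prop :=
  vlabels ≠ [] ∧
  0 ≤ PySem.Str.find LETTERS_py ((PySem.List.min? vlabels (fun x => x.toList)).getD "") ∧
  (PySem.Str.find LETTERS_py ((PySem.List.min? vlabels (fun x => x.toList)).getD "")).toNat
    + (PySem.List.dedup ((edgesOf vlabels).map canonB)).length ≤ 52

instance (vlabels : List String) : Decidable (Pre_get_edge_labels_from_vertex_labels_py vlabels) := by
  unfold Pre_get_edge_labels_from_vertex_labels_py; infer_instance

def pvWitness_get_edge_labels_from_vertex_labels_py : List String := ["A", "B", "C"]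

def Spec_get_edge_labels_from_vertex_labels_py (vlabels : List String) (out : List String) : Prop := out = get_edge_labels_from_vertex_labels_py_alt vlabels
instance (vlabels : List String) (out : List String) : Decidable (Spec_get_edge_labels_from_vertex_labels_py vlabels out) := by unfold Spec_get_edge_labels_from_vertex_labels_py; infer_instance

-- ===== CLAIM (what is proved, stated in full; the proofs are below) =====
def Claim_equal_get_edge_labels_from_vertex_labels_py : Prop := ∀ (vlabels : List String), Dom_get_edge_labels_from_vertex_labels_py vlabels → Pre_get_edge_labels_from_vertex_labels_py vlabels → Spec_get_edge_labels_from_vertex_labels_py vlabels (get_edge_labels_from_vertex_labels_py vlabels)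

-- ===== LEMMAS AND PROOFS =====

-- the letter string at index n (agrees with letters_py[n] for n < 52)
def letterStr (n : Nat) : String := String.singleton (letters_py.toList.getD n 'a')

-- the canonical-key accumulator of the ghost "seen" list
def addC (s : List String) (e : String) : List String := PySem.Set.add s (canonB e)

theorem srev_eq (s : String) : srev s = String.ofList s.toList.reverse := by
  simp [srev, PySem.Str.slice?_none_none_neg_one]

theorem srev_srev (s : String) : srev (srev s) = s := by
  rw [srev_eq, srev_eq]; simp

theorem canonB_srev (e : String) : canonB (srev e) = canonB e := by
  unfold canonB
  rw [srev_srev]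
  by_cases h : (srev e).toList < e.toList <;> by_cases h2 : e.toList < (srev e).toList
  · exact absurd h2 (lt_asymm h)
  · simp [h, h2]
  · simp [h, h2]
  · have : e = srev e := String.toList_inj.mp (by
      rcases lt_trichotomy e.toList (srev e).toList with h3 | h3 | h3
      · exact absurd h3 h2
      · exact h3
      · exact absurd h3 h)
    simp only [if_neg h, if_neg h2]
    exact this.symm

theorem canonB_eq {a b : String} (h : canonB a = canonB b) : a = b ∨ a = srev b := by
  by_cases ha : (srev a).toList < a.toList <;> by_cases hb : (srev b).toList < b.toList <;>
    simp [canonB, ha, hb] at h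
  · left
    have := congrArg srev h
    rwa [srev_srev, srev_srev] at this
  · right
    have := congrArg srev h
    rwa [srev_srev] at this
  · right; exact h
  · left; exact h

theorem addC_of_mem {s : List String} {e : String} (h : canonB e ∈ s) : addC s e = s := by
  simp [addC, PySem.Set.add, PySem.Set.contains, h]

theorem addC_of_not_mem {s : List String} {e : String} (h : canonB e ∉ s) :
    addC s e = s ++ [canonB e] := by
  simp [addC, PySem.Set.add, PySem.Set.contains, h]

theorem length_le_foldl_addC (es : List String) : ∀ (s : List String),
    s.length ≤ (es.foldl addC s).length := by
  induction es with
  | nil => intro s; simp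
  | cons e rest ih =>
    intro s
    refine le_trans ?_ (ih (addC s e))
    by_cases h : canonB e ∈ s
    · rw [addC_of_mem h]
    · rw [addC_of_not_mem h]; simp

theorem foldl_addC_eq_dedup (es : List String) :
    es.foldl addC [] = PySem.List.dedup (es.map canonB) := by
  rw [PySem.List.dedup_eq_ofList]
  have := PySem.Set.update_map_eq_foldl_add (α := String) es canonB []
  rw [show (List.foldl (fun s b => PySem.Set.add s (canonB b)) [] es) = es.foldl addC [] from rfl] at this
  rw [← this]
  rfl

theorem index?_lt_length {l : List String} {k : String} {i : Nat}
    (h : PySem.List.index? l k = some i) : i < l.length := by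
  obtain ⟨pre, suf, hl, hlen, -⟩ := (PySem.List.index?_eq_some_iff l k i).mp h
  subst hl; subst hlen; simp

theorem letters_len : letters_py.toList.length = 52 := by decide

theorem pyGet_letters {n : Nat} (h : n < 52) :
    PySem.Str.pyGet? letters_py ((n : Nat) : Int) = some (letters_py.toList.getD n 'a') := by
  rw [PySem.Str.pyGet?_natCast]
  rw [List.getElem?_eq_getElem (by rw [letters_len]; exact h)]
  rw [List.getD_eq_getElem?_getD, List.getElem?_eq_getElem (by rw [letters_len]; exact h)]
  rfl

-- main invariant of A's loop: the dict always maps a key e to the letter of the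
-- first-occurrence index of its canonical key in the ghost list "seen"
theorem mainA (start : Nat) (es : List String) : ∀ (d : PySem.Dict String String) (seen : List String),
    (∀ e v, d.get? e = some v → ∃ i, PySem.List.index? seen (canonB e) = some i ∧ v = letterStr (start + i)) →
    (∀ e, canonB e ∈ seen → (d.get? e).isSome = true ∨ (d.get? (srev e)).isSome = true) →
    start + (es.foldl addC seen).length ≤ 52 →
    ∃ d', es.foldl stepA (some (d, (start : Int) + (seen.length : Int))) =
        some (d', (start : Int) + ((es.foldl addC seen).length : Int)) ∧
      (∀ e v, d'.get? e = some v → ∃ i, PySem.List.index? (es.foldl addC seen) (canonB e) = some i ∧ v = letterStr (start + i)) ∧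
      (∀ e v, d.get? e = some v → d'.get? e = some v) ∧
      (∀ e ∈ es, (d'.get? e).isSome = true) := by
  induction es with
  | nil =>
    intro d seen hgood hcover _
    exact ⟨d, by simp, hgood, fun e v h => h, by simp⟩
  | cons e rest ih =>
    intro d seen hgood hcover hbound
    simp only [List.foldl_cons] at hbound ⊢
    have insert_pres : ∀ (v : String) (x : String), (d.get? x).isSome = true →
        ((d.insert e v).get? x).isSome = true := by
      intro v x hx
      rw [PySem.Dict.get?_insert]
      split
      · rfl
      · exact hx
    by_cases hd : (d.get? e).isSome = true
    · -- e already a key: no change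
      have hc : d.contains e = true := by
        rw [PySem.Dict.contains_eq_isSome_get?]; exact hd
      have hstep : stepA (some (d, (start : Int) + (seen.length : Int))) e
          = some (d, (start : Int) + (seen.length : Int)) := by
        simp [stepA, hc]
      obtain ⟨v, hv⟩ := Option.isSome_iff_exists.mp hd
      obtain ⟨i, hi, -⟩ := hgood e v hv
      have hmem : canonB e ∈ seen :=
        (PySem.List.index?_isSome_iff seen (canonB e)).mp (by rw [hi]; rfl)
      have hadd : addC seen e = seen := addC_of_mem hmem
      rw [hadd] at hbound ⊢
      obtain ⟨d', h1, h2, h3, h4⟩ := ih d seen hgood hcover hbound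
      refine ⟨d', by rw [hstep]; exact h1, h2, h3, ?_⟩
      intro x hx
      rcases List.mem_cons.mp hx with rfl | hx
      · rw [h3 x v hv]; rfl
      · exact h4 x hx
    · by_cases hs : (d.get? (srev e)).isSome = true
      · -- reverse edge is a key: copy its letter
        have hc : d.contains e = false := by
          rw [PySem.Dict.contains_eq_isSome_get?]; simpa using hd
        have hcs : d.contains (srev e) = true := by
          rw [PySem.Dict.contains_eq_isSome_get?]; exact hs
        obtain ⟨v, hv⟩ := Option.isSome_iff_exists.mp hs
        have hstep : stepA (some (d, (start : Int) + (seen.length : Int))) e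
            = some (d.insert e v, (start : Int) + (seen.length : Int)) := by
          simp [stepA, hc, hcs, hv]
        obtain ⟨i, hi, hvi⟩ := hgood (srev e) v hv
        rw [canonB_srev] at hi
        have hmem : canonB e ∈ seen :=
          (PySem.List.index?_isSome_iff seen (canonB e)).mp (by rw [hi]; rfl)
        have hadd : addC seen e = seen := addC_of_mem hmem
        rw [hadd] at hbound ⊢
        have hgood' : ∀ k w, (d.insert e v).get? k = some w →
            ∃ i, PySem.List.index? seen (canonB k) = some i ∧ w = letterStr (start + i) := by
          intro k w hk
          rw [PySem.Dict.get?_insert] at hk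
          split at hk
          · rename_i hke
            subst hke
            exact ⟨i, hi, by injection hk with h; rw [← h]; exact hvi⟩
          · exact hgood k w hk
        have hcover' : ∀ k, canonB k ∈ seen → ((d.insert e v).get? k).isSome = true ∨
            ((d.insert e v).get? (srev k)).isSome = true := by
          intro k hk
          rcases hcover k hk with h | h
          · exact Or.inl (insert_pres v k h)
          · exact Or.inr (insert_pres v (srev k) h)
        obtain ⟨d', h1, h2, h3, h4⟩ := ih (d.insert e v) seen hgood' hcover' hbound
        have hmono : ∀ x w, d.get? x = some w → d'.get? x = some w := by
          intro x w hx
          apply h3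
          rw [PySem.Dict.get?_insert, if_neg]
          · exact hx
          · rintro rfl
            rw [hx] at hd
            exact hd rfl
        refine ⟨d', by rw [hstep]; exact h1, h2, hmono, ?_⟩
        intro x hx
        rcases List.mem_cons.mp hx with rfl | hx
        · rw [h3 x v (PySem.Dict.get?_insert_self d x v)]; rfl
        · exact h4 x hx
      · -- new canonical key: assign the next letter
        have hde : d.get? e = none := by
          cases h : d.get? e
          · rfl
          · rw [h] at hd; exact absurd rfl hd
        have hds : d.get? (srev e) = none := by
          cases h : d.get? (srev e)
          · rfl
          · rw [h] at hs; exact absurd rfl hs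
        have hc : d.contains e = false := by
          rw [PySem.Dict.contains_eq_isSome_get?, hde]; rfl
        have hcs : d.contains (srev e) = false := by
          rw [PySem.Dict.contains_eq_isSome_get?, hds]; rfl
        have hnotmem : canonB e ∉ seen := by
          intro hmem
          rcases hcover e hmem with h | h
          · rw [hde] at h; exact absurd h (by simp)
          · rw [hds] at h; exact absurd h (by simp)
        have hadd : addC seen e = seen ++ [canonB e] := addC_of_not_mem hnotmem
        rw [hadd] at hbound ⊢
        have hlen := length_le_foldl_addC rest (seen ++ [canonB e])
        have hlt : start + seen.length < 52 := by
          simp only [List.length_append, List.length_cons, List.length_nil] at hlen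
          omega
        have hget : PySem.Str.pyGet? letters_py ((start : Int) + (seen.length : Int))
            = some (letters_py.toList.getD (start + seen.length) 'a') := by
          have := pyGet_letters hlt
          rwa [show (((start + seen.length : Nat)) : Int) = (start : Int) + (seen.length : Int) by push_cast; ring] at this
        have hget2 : PySem.List.pyGet? letters_py.toList ((start : Int) + (seen.length : Int))
            = some (letters_py.toList.getD (start + seen.length) 'a') := by simpa using hget
        have hstep : stepA (some (d, (start : Int) + (seen.length : Int))) e
            = some (d.insert e (letterStr (start + seen.length)),
                    (start : Int) + (seen.length : Int) + 1) := by
          simp [stepA, hc, hcs, hget2, letterStr, List.getD_eq_getElem?_getD]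
        have harith : (start : Int) + (seen.length : Int) + 1
            = (start : Int) + (((seen ++ [canonB e]).length : Nat) : Int) := by
          simp; ring
        have hgood' : ∀ k w, (d.insert e (letterStr (start + seen.length))).get? k = some w →
            ∃ i, PySem.List.index? (seen ++ [canonB e]) (canonB k) = some i ∧ w = letterStr (start + i) := by
          intro k w hk
          rw [PySem.Dict.get?_insert] at hk
          split at hk
          · rename_i hke
            subst hke
            refine ⟨seen.length, PySem.List.index?_append_singleton_self seen (canonB k) hnotmem, ?_⟩
            injection hk with h
            rw [← h]
          · obtain ⟨i, hi, hvi⟩ := hgood k w hk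
            have hmemk : canonB k ∈ seen :=
              (PySem.List.index?_isSome_iff seen (canonB k)).mp (by rw [hi]; rfl)
            exact ⟨i, by rw [PySem.List.index?_append_of_mem [canonB e] hmemk]; exact hi, hvi⟩
        have hcover' : ∀ k, canonB k ∈ seen ++ [canonB e] →
            ((d.insert e (letterStr (start + seen.length))).get? k).isSome = true ∨
            ((d.insert e (letterStr (start + seen.length))).get? (srev k)).isSome = true := by
          intro k hk
          rcases List.mem_append.mp hk with hk | hk
          · rcases hcover k hk with h | h
            · exact Or.inl (insert_pres _ k h)
            · exact Or.inr (insert_pres _ (srev k) h)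
          · rw [List.mem_singleton] at hk
            rcases canonB_eq hk with rfl | rfl
            · exact Or.inl (by rw [PySem.Dict.get?_insert_self]; rfl)
            · refine Or.inr ?_
              rw [srev_srev, PySem.Dict.get?_insert_self]
              rfl
        obtain ⟨d', h1, h2, h3, h4⟩ :=
          ih (d.insert e (letterStr (start + seen.length))) (seen ++ [canonB e]) hgood' hcover' hbound
        have hmono : ∀ x w, d.get? x = some w → d'.get? x = some w := by
          intro x w hx
          apply h3
          rw [PySem.Dict.get?_insert, if_neg]
          · exact hx
          · rintro rfl
            rw [hx] at hde
            exact Option.some_ne_none w hde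
        refine ⟨d', ?_, h2, hmono, ?_⟩
        · rw [hstep, harith]
          exact h1
        · intro x hx
          rcases List.mem_cons.mp hx with rfl | hx
          · rw [h3 x _ (PySem.Dict.get?_insert_self d x _)]; rfl
          · exact h4 x hx

-- ===== VERDICT (by name: the statement is the Claim_ definition above) =====
theorem get_edge_labels_from_vertex_labels_py_spec : Claim_equal_get_edge_labels_from_vertex_labels_py := by
  intro vlabels _ hpre
  obtain ⟨hne, hfind, hbound⟩ := hpre
  obtain ⟨m, hm⟩ : ∃ m, PySem.List.min? vlabels (fun x => x.toList) = some m := by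
    cases h : PySem.List.min? vlabels (fun x => x.toList)
    · exact absurd ((PySem.List.min?_eq_none_iff _ _).mp h) hne
    · exact ⟨_, rfl⟩
  rw [hm, Option.getD_some] at hfind hbound
  have hFs : PySem.Str.find LETTERS_py m = (((PySem.Str.find LETTERS_py m).toNat : Nat) : Int) :=
    (Int.toNat_of_nonneg hfind).symm
  have hneg : ¬ PySem.Str.find LETTERS_py m < 0 := not_lt.mpr hfind
  obtain ⟨d', h1, h2, -, h4⟩ :=
    mainA (PySem.Str.find LETTERS_py m).toNat (edgesOf vlabels) PySem.Dict.empty []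
      (by intro e v h; rw [PySem.Dict.get?_empty] at h; exact absurd h (by simp))
      (by intro e h; exact absurd h (List.not_mem_nil))
      (by rw [foldl_addC_eq_dedup]; exact hbound)
  simp only [List.length_nil, Nat.cast_zero, add_zero] at h1
  rw [foldl_addC_eq_dedup] at h1 h2
  unfold Spec_get_edge_labels_from_vertex_labels_py
  unfold get_edge_labels_from_vertex_labels_py get_edge_labels_from_vertex_labels_py_alt
  rw [hm]
  simp only [if_neg hneg]
  rw [show (PySem.Str.find LETTERS_py m)
      = (((PySem.Str.find LETTERS_py m).toNat : Nat) : Int) from hFs, h1]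
  rw [List.map_map]
  apply List.map_congr_left
  intro e he
  obtain ⟨v, hv⟩ := Option.isSome_iff_exists.mp (h4 e he)
  obtain ⟨i, hi, hvi⟩ := h2 e v hv
  have hilt : i < (PySem.List.dedup ((edgesOf vlabels).map canonB)).length := index?_lt_length hi
  have hlt : (PySem.Str.find LETTERS_py m).toNat + i < 52 := by omega
  have hget := pyGet_letters hlt
  simp only [Function.comp_apply]
  rw [hi, hv, Option.getD_some]
  rw [Nat.cast_add] at hget
  simp only [hget]
  exact hvi
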